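-- pv_equiv track=rewrite | github.com/eunhee-dev/problem-solving | 0x04_linked-list/1158/solve_recursion.py | get_removed_recursive
-- ===== SOURCE A (Python) =====
-- def get_removed_recursive(n: int, k: int, curr_idx: int) -> list:
--     if n == 1:
--         return [0]
--
--     next_idx = (curr_idx + k - 1) % n
--     remaining_order = get_removed_recursive(n-1, k, next_idx)
--
--     return [next_idx] + [
--         idx if idx < next_idx else idx + 1
--         for idx in remaining_order
--     ]
-- ===== SOURCE B (Python) =====
-- def get_removed_recursive(n: int, k: int, curr_idx: int) -> list:
--     people = list(range(n))
--     idx = curr_idx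
--     out = []
--     while people:
--         idx = (idx + k - 1) % len(people)
--         out.append(people.pop(idx))
--     return out
-- ===== Notes on version B (the rewrite author's own statement) =====
-- stated objective: faster
-- what changed: Replaces A's O(n^2) recursion that rebuilds and re-indexes the whole remaining-order list at every level with a single iterative loop that keeps a live list of original indices and pops the (k-1 mod len)-th survivor each round.
import Mathlib
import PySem

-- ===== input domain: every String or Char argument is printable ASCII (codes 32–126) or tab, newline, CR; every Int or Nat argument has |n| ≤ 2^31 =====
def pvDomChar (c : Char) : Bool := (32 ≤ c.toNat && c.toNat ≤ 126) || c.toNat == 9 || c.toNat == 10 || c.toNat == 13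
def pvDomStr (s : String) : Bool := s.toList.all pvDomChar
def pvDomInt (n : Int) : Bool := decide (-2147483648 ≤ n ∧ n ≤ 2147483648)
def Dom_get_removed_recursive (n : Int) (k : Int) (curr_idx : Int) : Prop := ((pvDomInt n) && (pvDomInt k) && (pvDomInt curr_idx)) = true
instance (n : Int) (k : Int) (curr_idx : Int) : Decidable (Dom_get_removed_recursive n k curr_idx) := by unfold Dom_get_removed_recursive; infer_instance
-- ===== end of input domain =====

-- B replaces A's recursion-with-reindexing by one iterative pass that pops the k-th
-- survivor from a live list of original indices (same return value, much less list copying).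

-- ===== PORT A =====
def get_removed_recursive (n : Int) (k : Int) (curr_idx : Int) : List Int :=
  if n = 1 then [0]
  else if n ≤ 0 then []  -- totality guard only: Python raises here (ZeroDivisionError / RecursionError); outside Pre_
  else
    let next_idx := PySem.Int.mod (curr_idx + k - 1) n
    let remaining_order := get_removed_recursive (n - 1) k next_idx
    next_idx :: remaining_order.map (fun idx => if idx < next_idx then idx else idx + 1)
termination_by n.toNat
decreasing_by omega

-- ===== PORT B =====
-- the while-loop of Source B: state = (live list of original indices, current idx); out built by cons
def pvAltLoop (k : Int) (people : List Int) (idx : Int) : List Int :=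
  match people with
  | [] => []
  | p :: ps =>
    let j := PySem.Int.mod (idx + k - 1) (((p :: ps).length : Nat) : Int)
    match hp : PySem.List.pop? (p :: ps) j with
    | some (v, rest) => v :: pvAltLoop k rest j
    | none => []  -- unreachable: 0 ≤ j < length
termination_by people.length
decreasing_by
  have := PySem.List.length_of_pop?_eq_some _ hp
  simp_all

def get_removed_recursive_alt (n : Int) (k : Int) (curr_idx : Int) : List Int :=
  pvAltLoop k (PySem.List.pyRange 0 n 1) curr_idx

-- ===== PRECONDITION & SPEC =====
-- Pre_ excludes exactly the inputs on which Python A raises: n = 0 (ZeroDivisionError)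
-- and n < 0 (unbounded recursion / RecursionError).
def Pre_get_removed_recursive (n : Int) (k : Int) (curr_idx : Int) : Prop := 1 ≤ n
instance (n : Int) (k : Int) (curr_idx : Int) : Decidable (Pre_get_removed_recursive n k curr_idx) := by unfold Pre_get_removed_recursive; infer_instance
def pvWitness_get_removed_recursive : Int × Int × Int := (5, 3, 0)

def Spec_get_removed_recursive (n : Int) (k : Int) (curr_idx : Int) (out : List Int) : Prop := out = get_removed_recursive_alt n k curr_idx
instance (n : Int) (k : Int) (curr_idx : Int) (out : List Int) : Decidable (Spec_get_removed_recursive n k curr_idx out) := by unfold Spec_get_removed_recursive; infer_instance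

-- ===== CLAIM (what is proved, stated in full; the proofs are below) =====
def Claim_equal_get_removed_recursive : Prop := ∀ (n : Int) (k : Int) (curr_idx : Int), Dom_get_removed_recursive n k curr_idx → Pre_get_removed_recursive n k curr_idx → Spec_get_removed_recursive n k curr_idx (get_removed_recursive n k curr_idx)

-- ===== LEMMAS AND PROOFS =====

-- every entry of A's result is an index in [0, n)
theorem pvA_bounds (m : Nat) : ∀ (k c : Int), ∀ x ∈ get_removed_recursive (m : Int) k c, 0 ≤ x ∧ x < (m : Int) := by
  induction m using Nat.strong_induction_on with
  | _ m ih =>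
    intro k c x hx
    rw [get_removed_recursive] at hx
    split at hx
    · rename_i h1
      simp at hx
      omega
    · split at hx
      · simp at hx
      · rename_i h1 h0
        simp only [List.mem_cons, List.mem_map] at hx
        have hmod1 : (0:Int) < (m:Int) := by omega
        have hnn := PySem.Int.mod_nonneg (c + k - 1) hmod1
        have hlt := PySem.Int.mod_lt (c + k - 1) hmod1
        rcases hx with hx | ⟨i, hi, hfx⟩
        · omega
        · have hm2 : 2 ≤ (m:Int) := by omega
          have hcast : ((m:Int) - 1) = ((m - 1 : Nat) : Int) := by omega
          rw [hcast] at hi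
          have := ih (m - 1) (by omega) k (PySem.Int.mod (c + k - 1) m) i hi
          split at hfx <;> omega

-- A's recursion, evaluated against any live list of originals, is B's loop
theorem pvLoop_eq (m : Nat) : ∀ (people : List Int) (k c : Int), people.length = m →
    pvAltLoop k people c = (get_removed_recursive (m : Int) k c).map (fun i => people.getD i.toNat 0) := by
  induction m using Nat.strong_induction_on with
  | _ m ih =>
    intro people k c hlen
    match people with
    | [] =>
      have : m = 0 := by simpa using hlen.symm
      subst this
      rw [pvAltLoop.eq_def, get_removed_recursive]
      norm_num
    | p :: ps =>
      have hm : 0 < m := by simp at hlen; omega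
      have hmod1 : (0:Int) < (m:Int) := by exact_mod_cast hm
      rw [pvAltLoop.eq_def]
      simp only []
      set j := PySem.Int.mod (c + k - 1) (((p :: ps).length : Nat) : Int) with hj
      have hjm : j = PySem.Int.mod (c + k - 1) (m : Int) := by rw [hj, hlen]
      have hnn : 0 ≤ j := by rw [hjm]; exact PySem.Int.mod_nonneg _ hmod1
      have hlt : j < (m : Int) := by rw [hjm]; exact PySem.Int.mod_lt _ hmod1
      have hjnat : j.toNat < (p :: ps).length := by rw [hlen]; omega
      have hjeq : ((j.toNat : Nat) : Int) = j := by omega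
      have hpop := PySem.List.pop?_natCast (p :: ps) j.toNat hjnat
      rw [hjeq] at hpop
      rw [hpop]
      -- unfold A one step
      rcases Nat.lt_or_ge m 2 with hm1 | hm2
      · -- m = 1
        have : m = 1 := by omega
        subst this
        have hps : ps = [] := by simpa using hlen
        subst hps
        have hj0 : j = 0 := by omega
        rw [get_removed_recursive]
        simp [hj0]
        rw [pvAltLoop.eq_def]
      · -- m ≥ 2
        conv_rhs => rw [get_removed_recursive]
        have hne1 : ¬ ((m : Int) = 1) := by omega
        have hnle : ¬ ((m : Int) ≤ 0) := by omega
        simp only [hne1, hnle, if_false]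
        have hcast : ((m:Int) - 1) = ((m - 1 : Nat) : Int) := by omega
        have hrest : ((p :: ps).eraseIdx j.toNat).length = m - 1 := by
          rw [List.length_eraseIdx_of_lt hjnat, hlen]
        have hIH := ih (m - 1) (by omega) ((p :: ps).eraseIdx j.toNat) k j hrest
        rw [hIH]
        have hnext : PySem.Int.mod (c + k - 1) (m : Int) = j := hjm.symm
        rw [List.map_cons, List.map_map, hnext, hcast]
        congr 1
        · rw [List.getD_eq_getElem _ _ hjnat]
        · apply List.map_congr_left
          intro i hi
          have hib := pvA_bounds (m - 1) k j i hi
          have him : 0 ≤ i ∧ i < (m:Int) - 1 := by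
            constructor
            · exact hib.1
            · have := hib.2; omega
          simp only [Function.comp]
          by_cases hij : i < j
          · simp only [hij, if_pos]
            have h1 : i.toNat < ((p :: ps).eraseIdx j.toNat).length := by rw [hrest]; omega
            have h2 : i.toNat < (p :: ps).length := by rw [hlen]; omega
            rw [List.getD_eq_getElem _ _ h1, List.getD_eq_getElem _ _ h2]
            rw [List.getElem_eraseIdx]
            have : i.toNat < j.toNat := by omega
            simp [this]
          · simp only [hij, if_false]
            have h1 : i.toNat < ((p :: ps).eraseIdx j.toNat).length := by rw [hrest]; omega
            have h2 : (i + 1).toNat < (p :: ps).length := by rw [hlen]; omega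
            rw [List.getD_eq_getElem _ _ h1, List.getD_eq_getElem _ _ h2]
            rw [List.getElem_eraseIdx]
            have hnotlt : ¬ (i.toNat < j.toNat) := by omega
            rw [dif_neg hnotlt]
            have h3 : (i + 1).toNat = i.toNat + 1 := by omega
            simp only [h3]

-- ===== VERDICT (by name: the statement is the Claim_ definition above) =====
theorem get_removed_recursive_spec : Claim_equal_get_removed_recursive := by
  intro n k c _ hpre
  unfold Spec_get_removed_recursive get_removed_recursive_alt
  have hn1 : (1:Int) ≤ n := hpre
  have hlen : (PySem.List.pyRange 0 n 1).length = n.toNat := by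
    rw [PySem.List.length_pyRange_one]; omega
  rw [pvLoop_eq n.toNat _ k c hlen]
  have hcast : ((n.toNat : Nat) : Int) = n := by omega
  rw [hcast]
  symm
  conv_rhs => rw [← List.map_id (get_removed_recursive n k c)]
  apply List.map_congr_left
  intro i hi
  have hib : 0 ≤ i ∧ i < n := by
    have := pvA_bounds n.toNat k c i (by rwa [hcast])
    omega
  have h2 : i.toNat < (PySem.List.pyRange 0 n 1).length := by rw [hlen]; omega
  rw [List.getD_eq_getElem _ _ h2, PySem.List.getElem_pyRange_one]
  simp; omega
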